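-- pv_equiv track=rewrite | github.com/Eyalz111/Gianluigi-Cropsight | schedulers/email_watcher.py | _extract_reply_text
-- ===== SOURCE A (Python) =====
-- def _extract_reply_text(body: str) -> str:
--     """Extract just the reply portion of an email (before quoted text)."""
--     # Common reply markers
--     markers = [
--         "\nOn ",            # "On Mon, Feb 24..."
--         "\n>",              # Quoted text
--         "\n--- Original",   # Outlook-style
--         "\nFrom:",          # Forwarded marker
--         "---\nGianluigi",   # Our own signature
--     ]
--
--     text = body
--     for marker in markers:
--         idx = text.find(marker)
--         if idx > 0:
--             text = text[:idx]
--
--     return text.strip()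
-- ===== SOURCE B (Python) =====
-- def _extract_reply_text(body: str) -> str:
--     """Extract just the reply portion of an email (before quoted text)."""
--     markers = ("\nOn ", "\n>", "\n--- Original", "\nFrom:", "---\nGianluigi")
--     # A marker sitting at index 0 never truncates, so drop those up front.
--     active = [m for m in markers if not body.startswith(m)]
--     # Single left-to-right scan: stop at the first position where any
--     # remaining marker begins.
--     for i in range(1, len(body)):
--         if any(body.startswith(m, i) for m in active):
--             return body[:i].strip()
--     return body.strip()
-- ===== Notes on version B (the rewrite author's own statement) =====
-- stated objective: alternative
-- what changed: A iterates marker-by-marker, re-searching and re-slicing the shrinking text for each marker; B first drops markers already sitting at index 0, then makes one left-to-right scan over positions, stopping (with a single slice) at the first position where any remaining marker begins.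
import Mathlib
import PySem

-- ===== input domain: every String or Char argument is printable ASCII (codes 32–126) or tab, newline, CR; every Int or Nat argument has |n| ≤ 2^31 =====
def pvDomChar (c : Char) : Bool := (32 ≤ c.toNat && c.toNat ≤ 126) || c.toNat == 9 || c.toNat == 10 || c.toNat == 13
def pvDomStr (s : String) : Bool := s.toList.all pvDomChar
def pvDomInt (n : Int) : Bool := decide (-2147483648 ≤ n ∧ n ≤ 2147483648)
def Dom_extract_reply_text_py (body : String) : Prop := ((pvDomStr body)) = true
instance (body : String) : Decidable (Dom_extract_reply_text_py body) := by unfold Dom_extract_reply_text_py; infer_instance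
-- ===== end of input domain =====

-- B replaces A's marker-by-marker "find in the re-sliced text, then re-slice" loop by a single
-- position-by-position scan (after discarding markers found at index 0) that stops at the first
-- position where any remaining marker begins; objective: alternative traversal, same cost.

-- the five reply markers (shared data, used by both ports)
def pvMarkers : List (List Char) :=
  ["\nOn ".toList, "\n>".toList, "\n--- Original".toList, "\nFrom:".toList, "---\nGianluigi".toList]

-- ===== PORT A =====
def extract_reply_text_py (body : String) : String :=
  let text := pvMarkers.foldl (fun t marker =>
      let idx := PySem.Chars.find t marker
      if 0 < idx then PySem.List.slice t none (some idx) else t)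
    body.toList
  String.ofList (PySem.Chars.strip text)

-- ===== PORT B =====
-- the 'for i in range(1, len(body))' loop of Source B: scan positions, early return on a hit;
-- body.startswith(m, i) for 0 ≤ i ≤ len is exactly PySem.Chars.startswith (cs.drop i) m
def pvScanB (cs : List Char) (active : List (List Char)) (i : Nat) : List Char :=
  if i < cs.length then
    if active.any (fun m => PySem.Chars.startswith (cs.drop i) m) then cs.take i
    else pvScanB cs active (i + 1)
  else cs
termination_by cs.length - i

def extract_reply_text_py_alt (body : String) : String :=
  let cs := body.toList
  let active := pvMarkers.filter (fun m => !(PySem.Chars.startswith cs m))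
  String.ofList (PySem.Chars.strip (pvScanB cs active 1))

-- ===== PRECONDITION & SPEC =====
def Spec_extract_reply_text_py (body : String) (out : String) : Prop := out = extract_reply_text_py_alt body
instance (body : String) (out : String) : Decidable (Spec_extract_reply_text_py body out) := by unfold Spec_extract_reply_text_py; infer_instance

-- ===== CLAIM (what is proved, stated in full; the proofs are below) =====
def Claim_equal_extract_reply_text_py : Prop := ∀ (body : String), Dom_extract_reply_text_py body → Spec_extract_reply_text_py body (extract_reply_text_py body)

-- ===== LEMMAS AND PROOFS =====

-- A's loop body, named (definitionally equal to the lambda in the port of A)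
def pvStep (t m : List Char) : List Char :=
  let idx := PySem.Chars.find t m
  if 0 < idx then PySem.List.slice t none (some idx) else t

-- the cut position A's loop maintains, expressed against the ORIGINAL body, in Nat form
def pvCut (cs : List Char) (n : Nat) (m : List Char) : Nat :=
  if 0 < PySem.Chars.find cs m then min n (PySem.Chars.find cs m).toNat else n

-- find points at THE first occurrence: an occurrence with nothing earlier pins its value
lemma pvFind_eq (s m : List Char) (q : Nat) (h1 : m <+: s.drop q)
    (h2 : ∀ i, i < q → ¬ m <+: s.drop i) : PySem.Chars.find s m = (q : Int) := by
  have hinf : m <:+: s := h1.isInfix.trans (List.drop_suffix q s).isInfix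
  have h0 : 0 ≤ PySem.Chars.find s m := (PySem.Chars.find_nonneg_iff s m).mpr hinf
  obtain ⟨ha, hb⟩ := PySem.Chars.find_spec h0
  rcases lt_trichotomy (PySem.Chars.find s m).toNat q with h | h | h
  · exact absurd ha (h2 _ h)
  · omega
  · exact absurd h1 (hb q h)

-- how find behaves on a prefix: the occurrence survives iff it fits entirely
lemma pvFind_take (cs m : List Char) (n : Nat) :
    PySem.Chars.find (cs.take n) m =
      if 0 ≤ PySem.Chars.find cs m ∧ (PySem.Chars.find cs m).toNat + m.length ≤ n
      then PySem.Chars.find cs m else -1 := by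
  split_ifs with h
  · obtain ⟨h0, hfit⟩ := h
    obtain ⟨ha, hb⟩ := PySem.Chars.find_spec h0
    have h1 : m <+: (cs.take n).drop (PySem.Chars.find cs m).toNat := by
      rw [List.drop_take]
      exact (List.prefix_take_iff).mpr ⟨ha, by omega⟩
    have h2 : ∀ i, i < (PySem.Chars.find cs m).toNat → ¬ m <+: (cs.take n).drop i := by
      intro i hi hp
      rw [List.drop_take] at hp
      exact hb i hi (hp.trans (List.take_prefix _ _))
    rw [pvFind_eq (cs.take n) m _ h1 h2]
    omega
  · by_cases hm : m = []
    · exact absurd ⟨by simp [hm, PySem.Chars.find_nil], by simp [hm]⟩ h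
    rw [PySem.Chars.find_eq_neg_one_iff]
    intro hinf
    obtain ⟨j, hj⟩ := (PySem.Chars.exists_prefix_drop_iff_isIn m (cs.take n)).mpr
      ((PySem.Chars.isIn_iff_infix m (cs.take n)).mpr hinf)
    rw [List.drop_take] at hj
    have hj' : m <+: cs.drop j := hj.trans (List.take_prefix _ _)
    have hlen : m.length ≤ n - j := le_trans hj.length_le (by simp)
    have hml : 0 < m.length := List.length_pos_of_ne_nil hm
    have h0 : 0 ≤ PySem.Chars.find cs m :=
      (PySem.Chars.find_nonneg_iff cs m).mpr (hj'.isInfix.trans (List.drop_suffix j cs).isInfix)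
    obtain ⟨ha, hb⟩ := PySem.Chars.find_spec h0
    have hq : (PySem.Chars.find cs m).toNat ≤ j := by
      by_contra hc
      exact hb j (by omega) hj'
    exact h ⟨h0, by omega⟩

-- the five markers never overlap a shifted copy of one another
lemma pvOverlapFree : ∀ mi ∈ pvMarkers, ∀ mj ∈ pvMarkers, ∀ d ∈ List.range mj.length,
    1 ≤ d → ¬(mj.drop d <+: mi ∨ mi <+: mj.drop d) := by decide

-- one step of A on a prefix of the original body, assuming no straddling occurrence
lemma pvStep_take (cs m : List Char) (n : Nat)
    (hsafe : ¬(0 < PySem.Chars.find cs m ∧ (PySem.Chars.find cs m).toNat < n ∧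
               n < (PySem.Chars.find cs m).toNat + m.length)) :
    pvStep (cs.take n) m = cs.take (pvCut cs n m) := by
  unfold pvStep pvCut
  rw [pvFind_take]
  by_cases h0 : 0 < PySem.Chars.find cs m
  · by_cases hfit : (PySem.Chars.find cs m).toNat + m.length ≤ n
    · rw [if_pos (And.intro (le_of_lt h0) hfit), if_pos h0, if_pos h0,
        PySem.List.slice_to _ (le_of_lt h0), List.take_take]
      congr 1
      omega
    · have hn : n ≤ (PySem.Chars.find cs m).toNat := by
        by_contra hc
        exact hsafe ⟨h0, by omega, by omega⟩
      have hCneg : ¬(0 ≤ PySem.Chars.find cs m ∧ (PySem.Chars.find cs m).toNat + m.length ≤ n) :=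
        fun hc => hfit hc.2
      rw [if_neg hCneg, if_neg (by norm_num : ¬ (0:Int) < -1), if_pos h0]
      congr 1
      omega
  · by_cases hC : 0 ≤ PySem.Chars.find cs m ∧ (PySem.Chars.find cs m).toNat + m.length ≤ n
    · rw [if_pos hC, if_neg h0, if_neg h0]
    · rw [if_neg hC, if_neg (by norm_num : ¬ (0:Int) < -1), if_neg h0]

-- A's whole fold, run on cs.take n, equals one take at the folded cut position,
-- provided n is the length or an occurrence position of some marker
lemma pvFold_take (cs : List Char) (ms : List (List Char)) : ∀ (n : Nat),
    (∀ m ∈ ms, m ∈ pvMarkers) →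
    (n = cs.length ∨ ∃ mi ∈ pvMarkers, mi <+: cs.drop n) →
    ms.foldl pvStep (cs.take n) = cs.take (ms.foldl (pvCut cs) n) := by
  induction ms with
  | nil => intro n _ _; rfl
  | cons m ms ih =>
    intro n hsub hchar
    have hm : m ∈ pvMarkers := hsub m List.mem_cons_self
    have hsafe : ¬(0 < PySem.Chars.find cs m ∧ (PySem.Chars.find cs m).toNat < n ∧
        n < (PySem.Chars.find cs m).toNat + m.length) := by
      rintro ⟨hpos, hlt, hgt⟩
      obtain ⟨ha, _⟩ := PySem.Chars.find_spec (le_of_lt hpos)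
      rcases hchar with rfl | ⟨mi, hmi, hpre⟩
      · have := ha.length_le
        simp [List.length_drop] at this
        omega
      · have hd : m.drop (n - (PySem.Chars.find cs m).toNat) <+: cs.drop n := by
          have h2 := ha.drop (n - (PySem.Chars.find cs m).toNat)
          rwa [List.drop_drop, Nat.add_sub_cancel' (le_of_lt hlt)] at h2
        exact pvOverlapFree mi hmi m hm (n - (PySem.Chars.find cs m).toNat)
          (List.mem_range.mpr (by omega)) (by omega)
          (List.prefix_or_prefix_of_prefix hd hpre)
    rw [List.foldl_cons, pvStep_take cs m n hsafe, List.foldl_cons]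
    apply ih (pvCut cs n m) (fun x hx => hsub x (List.mem_cons_of_mem m hx))
    unfold pvCut
    split_ifs with hp
    · rcases le_total n (PySem.Chars.find cs m).toNat with h | h
      · rw [min_eq_left h]; exact hchar
      · rw [min_eq_right h]
        right
        exact ⟨m, hm, (PySem.Chars.find_spec (le_of_lt hp)).1⟩
    · exact hchar

-- ===== facts about the folded cut position C = foldl (pvCut cs) len pvMarkers =====

-- the cut only decreases
lemma pvCutFold_le (cs : List Char) (ms : List (List Char)) : ∀ a, ms.foldl (pvCut cs) a ≤ a := by
  induction ms with
  | nil => intro a; exact le_rfl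
  | cons m ms ih =>
    intro a
    refine le_trans (ih _) ?_
    unfold pvCut
    split_ifs <;> omega

-- the cut is bounded by every positive find among the markers
lemma pvCutFold_le_find (cs : List Char) (ms : List (List Char)) : ∀ a m, m ∈ ms →
    0 < PySem.Chars.find cs m → ms.foldl (pvCut cs) a ≤ (PySem.Chars.find cs m).toNat := by
  induction ms with
  | nil => intro a m h; exact absurd h (List.not_mem_nil)
  | cons x ms ih =>
    intro a m hm hp
    rcases List.mem_cons.mp hm with rfl | hm'
    · refine le_trans (pvCutFold_le cs ms _) ?_
      unfold pvCut
      rw [if_pos hp]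
      omega
    · exact ih _ m hm' hp

-- the cut is the start value or a positive find of some marker
lemma pvCutFold_cases (cs : List Char) (ms : List (List Char)) : ∀ a,
    ms.foldl (pvCut cs) a = a ∨
    ∃ m ∈ ms, 0 < PySem.Chars.find cs m ∧ ms.foldl (pvCut cs) a = (PySem.Chars.find cs m).toNat := by
  induction ms with
  | nil => intro a; exact Or.inl rfl
  | cons x ms ih =>
    intro a
    rcases ih (pvCut cs a x) with h | ⟨m, hm, hp, he⟩
    · rw [List.foldl_cons, h]
      unfold pvCut
      split_ifs with hx
      · rcases le_total a (PySem.Chars.find cs x).toNat with hle | hle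
        · exact Or.inl (min_eq_left hle)
        · exact Or.inr ⟨x, List.mem_cons_self, hx, min_eq_right hle⟩
      · exact Or.inl rfl
    · exact Or.inr ⟨m, List.mem_cons_of_mem x hm, hp, by rw [List.foldl_cons, he]⟩

-- the cut stays positive when it starts positive
lemma pvCutFold_pos (cs : List Char) (ms : List (List Char)) : ∀ a, 1 ≤ a →
    1 ≤ ms.foldl (pvCut cs) a := by
  induction ms with
  | nil => intro a h; exact h
  | cons x ms ih =>
    intro a h
    refine ih _ ?_
    unfold pvCut
    split_ifs with hx <;> omega

-- 'an active marker begins at position j' as Source B's any-test sees it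
lemma pvHit_iff (cs : List Char) (j : Nat) :
    ((pvMarkers.filter (fun m => !(PySem.Chars.startswith cs m))).any
        (fun m => PySem.Chars.startswith (cs.drop j) m)) = true ↔
      ∃ m ∈ pvMarkers, ¬ m <+: cs ∧ m <+: cs.drop j := by
  simp only [List.any_eq_true, List.mem_filter, Bool.not_eq_eq_eq_not, Bool.not_true,
    PySem.Chars.startswith_iff]
  constructor
  · rintro ⟨m, ⟨hm, hns⟩, hp⟩
    exact ⟨m, hm, fun hc => by simp [(PySem.Chars.startswith_iff cs m).mpr hc] at hns, hp⟩
  · rintro ⟨m, hm, hns, hp⟩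
    refine ⟨m, ⟨hm, ?_⟩, hp⟩
    rcases h : PySem.Chars.startswith cs m with _ | _
    · rfl
    · exact absurd ((PySem.Chars.startswith_iff cs m).mp h) hns

-- no active marker begins strictly before the cut position C (at positions ≥ 1)
lemma pvNoHit (cs : List Char) (j : Nat) (_hj1 : 1 ≤ j)
    (hjC : j < pvMarkers.foldl (pvCut cs) cs.length) :
    ¬ ∃ m ∈ pvMarkers, ¬ m <+: cs ∧ m <+: cs.drop j := by
  rintro ⟨m, hm, hns, hp⟩
  have hinf : m <:+: cs := hp.isInfix.trans (List.drop_suffix j cs).isInfix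
  have h0 : 0 ≤ PySem.Chars.find cs m := (PySem.Chars.find_nonneg_iff cs m).mpr hinf
  obtain ⟨ha, hb⟩ := PySem.Chars.find_spec h0
  have hne : PySem.Chars.find cs m ≠ 0 := by
    intro hc
    apply hns
    have := ha
    rw [hc] at this
    simpa using this
  have hpos : 0 < PySem.Chars.find cs m := lt_of_le_of_ne h0 (Ne.symm hne)
  have hlej : (PySem.Chars.find cs m).toNat ≤ j := by
    by_contra hc
    exact hb j (by omega) hp
  have := pvCutFold_le_find cs pvMarkers cs.length m hm hpos
  omega

-- some active marker begins exactly at C whenever C < len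
lemma pvHitAtC (cs : List Char) (hC : pvMarkers.foldl (pvCut cs) cs.length < cs.length) :
    ∃ m ∈ pvMarkers, ¬ m <+: cs ∧ m <+: cs.drop (pvMarkers.foldl (pvCut cs) cs.length) := by
  rcases pvCutFold_cases cs pvMarkers cs.length with h | ⟨m, hm, hp, he⟩
  · omega
  · obtain ⟨ha, _⟩ := PySem.Chars.find_spec (le_of_lt hp)
    refine ⟨m, hm, ?_, by rw [he]; exact ha⟩
    intro hc
    have : PySem.Chars.find cs m = (0 : Int) := pvFind_eq cs m 0 (by simpa using hc) (by omega)
    omega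

-- B's scan, started anywhere between 1 and C, stops exactly at C
lemma pvScanB_eq_take (cs : List Char) : ∀ (k i : Nat), cs.length - i ≤ k → 1 ≤ i →
    i ≤ pvMarkers.foldl (pvCut cs) cs.length →
    pvScanB cs (pvMarkers.filter (fun m => !(PySem.Chars.startswith cs m))) i =
      cs.take (pvMarkers.foldl (pvCut cs) cs.length) := by
  intro k
  induction k with
  | zero =>
    intro i hk hi1 hiC
    have hClen : pvMarkers.foldl (pvCut cs) cs.length ≤ cs.length := pvCutFold_le cs pvMarkers _
    rw [pvScanB, if_neg (by omega)]
    have hCeq : pvMarkers.foldl (pvCut cs) cs.length = cs.length := by omega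
    rw [hCeq, List.take_length]
  | succ k ih =>
    intro i hk hi1 hiC
    have hClen : pvMarkers.foldl (pvCut cs) cs.length ≤ cs.length := pvCutFold_le cs pvMarkers _
    rw [pvScanB]
    by_cases hlt : i < cs.length
    · rw [if_pos hlt]
      by_cases hhit : ((pvMarkers.filter (fun m => !(PySem.Chars.startswith cs m))).any
          (fun m => PySem.Chars.startswith (cs.drop i) m)) = true
      · rw [if_pos hhit]
        have hex := (pvHit_iff cs i).mp hhit
        have : ¬ i < pvMarkers.foldl (pvCut cs) cs.length := fun hc => pvNoHit cs i hi1 hc hex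
        congr 1
        omega
      · rw [if_neg hhit]
        have hiCne : i ≠ pvMarkers.foldl (pvCut cs) cs.length := by
          intro hc
          apply hhit
          apply (pvHit_iff cs i).mpr
          rw [hc]
          exact pvHitAtC cs (by omega)
        exact ih (i + 1) (by omega) (by omega) (by omega)
    · rw [if_neg hlt]
      have hCeq : pvMarkers.foldl (pvCut cs) cs.length = cs.length := by omega
      rw [hCeq, List.take_length]

-- ===== VERDICT (by name: the statement is the Claim_ definition above) =====
theorem extract_reply_text_py_spec : Claim_equal_extract_reply_text_py := by
  intro body _
  show extract_reply_text_py body = extract_reply_text_py_alt body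
  have hA : pvMarkers.foldl (fun t marker =>
      let idx := PySem.Chars.find t marker
      if 0 < idx then PySem.List.slice t none (some idx) else t) body.toList
      = body.toList.take (pvMarkers.foldl (pvCut body.toList) body.toList.length) := by
    have := pvFold_take body.toList pvMarkers body.toList.length (fun _ h => h) (Or.inl rfl)
    rwa [List.take_length] at this
  have hB : pvScanB body.toList
      (pvMarkers.filter (fun m => !(PySem.Chars.startswith body.toList m))) 1
      = body.toList.take (pvMarkers.foldl (pvCut body.toList) body.toList.length) := by
    by_cases hlen : body.toList.length = 0
    · have hnil : body.toList = [] := List.eq_nil_of_length_eq_zero hlen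
      rw [hnil, pvScanB]
      simp
    · exact pvScanB_eq_take body.toList (body.toList.length - 1) 1 (by omega) le_rfl
        (pvCutFold_pos body.toList pvMarkers body.toList.length (by omega))
  simp only [extract_reply_text_py, extract_reply_text_py_alt, hA, hB]
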